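-- pv_equiv track=rewrite | github.com/vivekdhir77/Castle-AI | main.py | pick_up_from_deck
-- ===== SOURCE A (Python) =====
-- CARD_TYPE_IN_HAND = "In Hand"
--
-- def pick_up_from_deck(deck, cards_in_hand):
--     """
--     Ensures the player has at least 3 cards in hand by picking up from the deck.
--     """
--     current_hand_count = sum(1 for card in cards_in_hand if card['type'] == CARD_TYPE_IN_HAND)
--     pick_up_count = max(3 - current_hand_count, 0)
--
--     for _ in range(pick_up_count):
--         if not deck:
--             break
--         deck[0]["type"] = CARD_TYPE_IN_HAND
--         cards_in_hand.append(deck.pop(0))  # Add to the end of the hand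
--
--     return deck, cards_in_hand
-- ===== SOURCE B (Python) =====
-- CARD_TYPE_IN_HAND = "In Hand"
--
-- def pick_up_from_deck(deck, cards_in_hand):
--     """
--     Ensures the player has at least 3 cards in hand by picking up from the deck.
--     """
--     current_hand_count = sum(1 for card in cards_in_hand if card['type'] == CARD_TYPE_IN_HAND)
--     take = min(max(3 - current_hand_count, 0), len(deck))
--     picked = deck[:take]
--     for card in picked:
--         card["type"] = CARD_TYPE_IN_HAND
--     cards_in_hand.extend(picked)
--     del deck[:take]
--     return deck, cards_in_hand
-- ===== Notes on version B (the rewrite author's own statement) =====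
-- stated objective: simpler
-- what changed: Replaces the bounded pop(0)-loop with its empty-deck break by computing the number of cards to take up front, slicing them off the deck in one batch, setting their type, and extending the hand once.
-- outside the precondition, e.g. on pick_up_from_deck([], [{'x': 'y'}]): A raises KeyError, B raises KeyError
import Mathlib
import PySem

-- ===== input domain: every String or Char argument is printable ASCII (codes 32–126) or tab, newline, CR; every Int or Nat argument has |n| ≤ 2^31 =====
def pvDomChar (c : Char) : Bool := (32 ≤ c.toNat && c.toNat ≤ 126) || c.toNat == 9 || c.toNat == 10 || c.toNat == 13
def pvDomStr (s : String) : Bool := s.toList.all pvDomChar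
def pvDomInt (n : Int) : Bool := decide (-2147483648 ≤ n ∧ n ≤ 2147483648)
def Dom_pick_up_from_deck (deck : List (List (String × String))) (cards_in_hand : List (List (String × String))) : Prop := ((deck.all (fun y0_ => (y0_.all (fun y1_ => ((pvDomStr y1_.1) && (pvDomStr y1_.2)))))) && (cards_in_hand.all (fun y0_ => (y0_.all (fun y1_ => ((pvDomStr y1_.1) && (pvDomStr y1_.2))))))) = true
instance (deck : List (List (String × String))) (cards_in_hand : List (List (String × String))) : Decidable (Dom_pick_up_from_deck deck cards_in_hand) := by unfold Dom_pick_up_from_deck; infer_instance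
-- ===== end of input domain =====

-- B replaces A's bounded pop(0)-loop (with its empty-deck break) by computing the take count up
-- front and moving one slice in a single batch (objective: simpler). Equivalence is about the
-- returned pair; both Pythons mutate deck and cards_in_hand in place in the same way.

-- ===== PORT A =====
-- the bounded loop: up to n iterations, break when the deck is empty,
-- each step sets deck[0]["type"] and moves deck.pop(0) to the end of the hand
def pickLoopA (n : Nat) (deck hand : List (List (String × String))) :
    (List (List (String × String))) × (List (List (String × String))) :=
  match n, deck with
  | 0, deck => (deck, hand)
  | _ + 1, [] => ([], hand)
  | n + 1, c :: rest =>
      pickLoopA n rest (hand ++ [(PySem.Dict.insert (PySem.Dict.mk c) "type" "In Hand").items])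

def pick_up_from_deck (deck : List (List (String × String))) (cards_in_hand : List (List (String × String))) : (List (List (String × String))) × (List (List (String × String))) :=
  let current_hand_count : Int :=
    cards_in_hand.foldl (fun acc card =>
      if (PySem.Dict.mk card).get? "type" == some "In Hand" then acc + 1 else acc) 0
  let pick_up_count : Int := max (3 - current_hand_count) 0
  pickLoopA pick_up_count.toNat deck cards_in_hand

-- ===== PORT B =====
def pick_up_from_deck_alt (deck : List (List (String × String))) (cards_in_hand : List (List (String × String))) : (List (List (String × String))) × (List (List (String × String))) :=
  let current_hand_count : Int :=
    cards_in_hand.foldl (fun acc card =>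
      if (PySem.Dict.mk card).get? "type" == some "In Hand" then acc + 1 else acc) 0
  let take : Nat := min (max (3 - current_hand_count) 0).toNat deck.length
  let picked := (deck.take take).map
    (fun card => (PySem.Dict.insert (PySem.Dict.mk card) "type" "In Hand").items)
  (deck.drop take, cards_in_hand ++ picked)

-- ===== PRECONDITION & SPEC =====
-- Pre_ excludes hands whose cards lack a "type" key (card['type'] raises KeyError in both A and B),
-- and cards given with duplicate keys, which a Python dict cannot represent.
def Pre_pick_up_from_deck (deck : List (List (String × String))) (cards_in_hand : List (List (String × String))) : Prop :=
  (cards_in_hand.all (fun c => c.any (fun kv => kv.1 == "type"))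
    && (deck ++ cards_in_hand).all (fun c => (c.map (·.1)).Nodup)) = true
instance (deck : List (List (String × String))) (cards_in_hand : List (List (String × String))) : Decidable (Pre_pick_up_from_deck deck cards_in_hand) := by unfold Pre_pick_up_from_deck; infer_instance

def pvWitness_pick_up_from_deck : (List (List (String × String))) × (List (List (String × String))) :=
  ([[("type", "Deck"), ("v", "7")], [("type", "Deck")]], [[("type", "In Hand")]])

def Spec_pick_up_from_deck (deck : List (List (String × String))) (cards_in_hand : List (List (String × String))) (out : (List (List (String × String))) × (List (List (String × String)))) : Prop := out = pick_up_from_deck_alt deck cards_in_hand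
instance (deck : List (List (String × String))) (cards_in_hand : List (List (String × String))) (out : (List (List (String × String))) × (List (List (String × String)))) : Decidable (Spec_pick_up_from_deck deck cards_in_hand out) := by unfold Spec_pick_up_from_deck; infer_instance

-- ===== CLAIM (what is proved, stated in full; the proofs are below) =====
def Claim_equal_pick_up_from_deck : Prop := ∀ (deck : List (List (String × String))) (cards_in_hand : List (List (String × String))), Dom_pick_up_from_deck deck cards_in_hand → Pre_pick_up_from_deck deck cards_in_hand → Spec_pick_up_from_deck deck cards_in_hand (pick_up_from_deck deck cards_in_hand)

-- ===== LEMMAS AND PROOFS =====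
theorem pickLoopA_eq (n : Nat) (deck hand : List (List (String × String))) :
    pickLoopA n deck hand =
      (deck.drop n, hand ++ (deck.take n).map
        (fun card => (PySem.Dict.insert (PySem.Dict.mk card) "type" "In Hand").items)) := by
  induction n generalizing deck hand with
  | zero => simp [pickLoopA]
  | succ n ih =>
      cases deck with
      | nil => simp [pickLoopA]
      | cons c rest => simp [pickLoopA, ih]

theorem drop_min_length {α : Type} (xs : List α) (n : Nat) :
    xs.drop (min n xs.length) = xs.drop n := by
  rcases Nat.le_total n xs.length with h | h
  · rw [Nat.min_eq_left h]
  · rw [Nat.min_eq_right h, List.drop_of_length_le h, List.drop_of_length_le (le_refl _)]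

theorem take_min_length {α : Type} (xs : List α) (n : Nat) :
    xs.take (min n xs.length) = xs.take n := by
  rcases Nat.le_total n xs.length with h | h
  · rw [Nat.min_eq_left h]
  · rw [Nat.min_eq_right h, List.take_of_length_le h, List.take_of_length_le (le_refl _)]

-- ===== VERDICT (by name: the statement is the Claim_ definition above) =====
theorem pick_up_from_deck_spec : Claim_equal_pick_up_from_deck := by
  intro deck cards_in_hand _ _
  unfold Spec_pick_up_from_deck pick_up_from_deck pick_up_from_deck_alt
  rw [pickLoopA_eq]
  simp [drop_min_length, take_min_length]
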